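-- pv_equiv track=rewrite | github.com/skitela/potential-robot | TOOLS/stage1_iteration_audit.py | _split_status_lines
-- ===== SOURCE A (Python) =====
-- from typing import Any, Dict, Iterable, List, Optional, Tuple
--
-- def _split_status_lines(lines: Iterable[str]) -> Tuple[List[str], List[str], List[str]]:
--     changed: List[str] = []
--     new: List[str] = []
--     deleted: List[str] = []
--     for ln in lines:
--         raw = str(ln or "").rstrip("\n")
--         if not raw.strip():
--             continue
--         code = raw[:2]
--         path = raw[3:].strip() if len(raw) > 3 else raw.strip()
--         if "D" in code:
--             deleted.append(path)
--         elif "?" in code: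
--             new.append(path)
--         else:
--             changed.append(path)
--     return changed, new, deleted
-- ===== SOURCE B (Python) =====
-- def _split_status_lines(lines):
--     # Two-phase: parse every line into a (code, path) entry first, then
--     # partition the entry list into the three buckets with comprehensions.
--     entries = []
--     for ln in lines:
--         raw = str(ln or "").rstrip("\n")
--         if not raw.strip():
--             continue
--         code = raw[:2]
--         path = raw[3:].strip() if len(raw) > 3 else raw.strip()
--         entries.append((code, path))
--     deleted = [p for c, p in entries if "D" in c]
--     new = [p for c, p in entries if "D" not in c and "?" in c]
--     changed = [p for c, p in entries if "D" not in c and "?" not in c]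
--     return changed, new, deleted
-- ===== Notes on version B (the rewrite author's own statement) =====
-- stated objective: alternative
-- what changed: A classifies each line into the three buckets inside one loop; B first parses all lines into a (code, path) entry list and then partitions that list into deleted/new/changed with three comprehensions.
import Mathlib
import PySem

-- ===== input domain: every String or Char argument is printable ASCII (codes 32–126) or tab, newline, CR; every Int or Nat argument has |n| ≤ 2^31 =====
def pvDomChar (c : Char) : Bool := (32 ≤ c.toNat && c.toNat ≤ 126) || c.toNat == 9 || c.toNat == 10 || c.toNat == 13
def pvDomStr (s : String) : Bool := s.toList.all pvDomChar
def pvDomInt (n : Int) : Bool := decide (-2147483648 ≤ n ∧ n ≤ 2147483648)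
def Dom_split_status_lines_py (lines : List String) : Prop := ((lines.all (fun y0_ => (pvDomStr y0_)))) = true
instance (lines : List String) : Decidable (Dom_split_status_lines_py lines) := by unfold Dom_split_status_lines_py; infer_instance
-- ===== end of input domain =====

-- B parses lines into (code, path) entries first and then partitions the entry list; same cost, different decomposition.

-- raw.rstrip("\n"): drop trailing newline characters (exact hand port; PySem has stripChars for both sides only)
def pyRstripNl (cs : List Char) : List Char := (cs.reverse.dropWhile (· == '\n')).reverse

-- ===== PORT A =====
-- the loop body of A (str(ln or "") = ln for a str argument)
def stepA (st : List String × List String × List String) (ln : String) :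
    List String × List String × List String :=
  let raw := pyRstripNl ln.toList
  if (PySem.Chars.strip raw).isEmpty then st
  else
    let code := PySem.Chars.slice raw none (some 2)
    let path := if raw.length > 3 then PySem.Chars.strip (PySem.Chars.slice raw (some 3) none)
                else PySem.Chars.strip raw
    if PySem.Chars.isIn ['D'] code then (st.1, st.2.1, st.2.2 ++ [String.ofList path])
    else if PySem.Chars.isIn ['?'] code then (st.1, st.2.1 ++ [String.ofList path], st.2.2)
    else (st.1 ++ [String.ofList path], st.2.1, st.2.2)

def split_status_lines_py (lines : List String) : List String × List String × List String :=
  lines.foldl stepA ([], [], [])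

-- ===== PORT B =====
-- phase 1 of B: parse one line into its (code, path) entry (none = blank line, skipped)
def parseEntry (ln : String) : Option (List Char × List Char) :=
  let raw := pyRstripNl ln.toList
  if (PySem.Chars.strip raw).isEmpty then none
  else
    let code := PySem.Chars.slice raw none (some 2)
    let path := if raw.length > 3 then PySem.Chars.strip (PySem.Chars.slice raw (some 3) none)
                else PySem.Chars.strip raw
    some (code, path)

def split_status_lines_py_alt (lines : List String) : List String × List String × List String :=
  let entries := lines.filterMap parseEntry
  let deleted := (entries.filter (fun e => PySem.Chars.isIn ['D'] e.1)).map (fun e => String.ofList e.2)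
  let new := (entries.filter (fun e => !PySem.Chars.isIn ['D'] e.1 && PySem.Chars.isIn ['?'] e.1)).map (fun e => String.ofList e.2)
  let changed := (entries.filter (fun e => !PySem.Chars.isIn ['D'] e.1 && !PySem.Chars.isIn ['?'] e.1)).map (fun e => String.ofList e.2)
  (changed, new, deleted)

-- ===== PRECONDITION & SPEC =====
def Spec_split_status_lines_py (lines : List String) (out : List String × List String × List String) : Prop := out = split_status_lines_py_alt lines
instance (lines : List String) (out : List String × List String × List String) : Decidable (Spec_split_status_lines_py lines out) := by unfold Spec_split_status_lines_py; infer_instance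

-- ===== CLAIM (what is proved, stated in full; the proofs are below) =====
def Claim_equal_split_status_lines_py : Prop := ∀ (lines : List String), Dom_split_status_lines_py lines → Spec_split_status_lines_py lines (split_status_lines_py lines)

-- ===== LEMMAS AND PROOFS =====

-- A's loop body, expressed on an already-parsed entry
def applyE (st : List String × List String × List String)
    (e : Option (List Char × List Char)) : List String × List String × List String :=
  match e with
  | none => st
  | some (code, path) =>
    if PySem.Chars.isIn ['D'] code then (st.1, st.2.1, st.2.2 ++ [String.ofList path])
    else if PySem.Chars.isIn ['?'] code then (st.1, st.2.1 ++ [String.ofList path], st.2.2)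
    else (st.1 ++ [String.ofList path], st.2.1, st.2.2)

theorem stepA_eq (st : List String × List String × List String) (ln : String) :
    stepA st ln = applyE st (parseEntry ln) := by
  unfold stepA parseEntry
  by_cases h1 : (PySem.Chars.strip (pyRstripNl ln.toList)).isEmpty
  · simp only [h1, if_true, applyE]
  · simp only [h1, if_false, Bool.false_eq_true, applyE]

theorem foldl_applyE (es : List (Option (List Char × List Char))) (c n d : List String) :
    es.foldl applyE (c, n, d)
    = (c ++ ((es.filterMap id).filter (fun e => !PySem.Chars.isIn ['D'] e.1 && !PySem.Chars.isIn ['?'] e.1)).map (fun e => String.ofList e.2),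
       n ++ ((es.filterMap id).filter (fun e => !PySem.Chars.isIn ['D'] e.1 && PySem.Chars.isIn ['?'] e.1)).map (fun e => String.ofList e.2),
       d ++ ((es.filterMap id).filter (fun e => PySem.Chars.isIn ['D'] e.1)).map (fun e => String.ofList e.2)) := by
  induction es generalizing c n d with
  | nil => simp
  | cons e es ih =>
    match e with
    | none => simpa [applyE] using ih c n d
    | some (code, path) =>
      simp only [List.foldl_cons, applyE, List.filterMap_cons, id]
      by_cases h2 : PySem.Chars.isIn ['D'] code
      · simp [h2, ih]
      · by_cases h3 : PySem.Chars.isIn ['?'] code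
        · simp [h2, h3, ih]
        · simp [h2, h3, ih]

-- ===== VERDICT (by name: the statement is the Claim_ definition above) =====
theorem split_status_lines_py_spec : Claim_equal_split_status_lines_py := by
  intro lines _
  unfold Spec_split_status_lines_py split_status_lines_py split_status_lines_py_alt
  have h : lines.foldl stepA ([], [], [])
      = (lines.map parseEntry).foldl applyE ([], [], []) := by
    rw [List.foldl_map]
    exact List.foldl_ext _ _ _ (fun st x _ => stepA_eq st x)
  rw [h, foldl_applyE]
  simp [List.filterMap_map]
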